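-- pv_equiv track=rewrite | github.com/onyagamarcel2/convert_xml_yaml | src/components/composite_component.py | _determine_security_context
-- ===== SOURCE A (Python) =====
-- from typing import Dict, List, Optional, Set
--
-- def _determine_security_context(subcomponents: List[Dict]) -> Dict:
--     """Détermine le contexte de sécurité d'un composant composite."""
--     security_context = {
--         'authentication': 'none',
--         'authorization': 'none',
--         'data_sensitivity': 'public'
--     }
--
--     # Analyse des sous-composants pour déterminer le contexte de sécurité
--     for component in subcomponents:
--         # Authentication
--         if component.get('authentication') == 'required':
--             security_context['authentication'] = 'required'
--
--         # Authorization
--         if component.get('authorization') == 'required':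
--             security_context['authorization'] = 'required'
--
--         # Data sensitivity
--         component_sensitivity = component.get('data_sensitivity', 'public')
--         if component_sensitivity == 'restricted':
--             security_context['data_sensitivity'] = 'restricted'
--         elif component_sensitivity == 'confidential' and security_context['data_sensitivity'] == 'public':
--             security_context['data_sensitivity'] = 'confidential'
--
--     return security_context
-- ===== SOURCE B (Python) =====
-- from typing import Dict, List
--
-- def _determine_security_context(subcomponents: List[Dict]) -> Dict:
--     """Détermine le contexte de sécurité d'un composant composite."""
--     sensitivities = [c.get('data_sensitivity', 'public') for c in subcomponents]
--     return {
--         'authentication': 'required' if any(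
--             c.get('authentication') == 'required' for c in subcomponents) else 'none',
--         'authorization': 'required' if any(
--             c.get('authorization') == 'required' for c in subcomponents) else 'none',
--         'data_sensitivity': ('restricted' if 'restricted' in sensitivities
--                              else 'confidential' if 'confidential' in sensitivities
--                              else 'public'),
--     }
-- ===== Notes on version B (the rewrite author's own statement) =====
-- stated objective: simpler
-- what changed: Replaced the single stateful accumulating loop over a mutable dict with three independent declarative any/membership computations (one per key), building the result dict in one expression.
import Mathlib
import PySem

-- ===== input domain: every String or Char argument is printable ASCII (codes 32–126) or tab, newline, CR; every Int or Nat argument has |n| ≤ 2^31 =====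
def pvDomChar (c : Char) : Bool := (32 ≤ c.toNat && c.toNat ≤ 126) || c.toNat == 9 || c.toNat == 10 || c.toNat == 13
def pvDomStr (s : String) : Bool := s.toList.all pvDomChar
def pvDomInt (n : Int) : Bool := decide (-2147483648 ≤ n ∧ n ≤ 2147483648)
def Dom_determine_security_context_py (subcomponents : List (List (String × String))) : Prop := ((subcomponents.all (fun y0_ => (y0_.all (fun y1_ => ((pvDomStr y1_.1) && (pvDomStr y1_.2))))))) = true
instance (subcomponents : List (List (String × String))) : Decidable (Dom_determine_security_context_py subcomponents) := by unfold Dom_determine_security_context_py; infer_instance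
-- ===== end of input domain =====

-- B replaces A's single stateful accumulating loop over a mutable dict with three
-- independent declarative any/membership computations, one per key (objective: simpler).


-- ===== PORT A =====
-- sc['k'] = v on an assoc-list dict whose key is already present: overwrite in place
def pySetKey (d : List (String × String)) (k v : String) : List (String × String) :=
  match d with
  | [] => []
  | (k', v') :: rest => if k' == k then (k', v) :: rest else (k', v') :: pySetKey rest k v

-- the body of A's for-loop (sc = security_context, component = current subcomponent)
def secStep (sc component : List (String × String)) : List (String × String) :=
  let sc := if List.lookup "authentication" component == some "required" then
              pySetKey sc "authentication" "required" else sc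
  let sc := if List.lookup "authorization" component == some "required" then
              pySetKey sc "authorization" "required" else sc
  let cs := (List.lookup "data_sensitivity" component).getD "public"
  if cs == "restricted" then pySetKey sc "data_sensitivity" "restricted"
  else if cs == "confidential" && (List.lookup "data_sensitivity" sc == some "public") then
    pySetKey sc "data_sensitivity" "confidential"
  else sc

def determine_security_context_py (subcomponents : List (List (String × String))) : List (String × String) :=
  subcomponents.foldl secStep
    [("authentication", "none"), ("authorization", "none"), ("data_sensitivity", "public")]

-- ===== PORT B =====
def determine_security_context_py_alt (subcomponents : List (List (String × String))) : List (String × String) :=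
  let sensitivities := subcomponents.map (fun c => (List.lookup "data_sensitivity" c).getD "public")
  [("authentication",
      if subcomponents.any (fun c => List.lookup "authentication" c == some "required")
      then "required" else "none"),
   ("authorization",
      if subcomponents.any (fun c => List.lookup "authorization" c == some "required")
      then "required" else "none"),
   ("data_sensitivity",
      if sensitivities.contains "restricted" then "restricted"
      else if sensitivities.contains "confidential" then "confidential"
      else "public")]

-- ===== PRECONDITION & SPEC =====
def Spec_determine_security_context_py (subcomponents : List (List (String × String))) (out : List (String × String)) : Prop := out = determine_security_context_py_alt subcomponents
instance (subcomponents : List (List (String × String))) (out : List (String × String)) : Decidable (Spec_determine_security_context_py subcomponents out) := by unfold Spec_determine_security_context_py; infer_instance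

-- ===== CLAIM (what is proved, stated in full; the proofs are below) =====
def Claim_equal_determine_security_context_py : Prop := ∀ (subcomponents : List (List (String × String))), Dom_determine_security_context_py subcomponents → Spec_determine_security_context_py subcomponents (determine_security_context_py subcomponents)

-- ===== LEMMAS AND PROOFS =====

-- A's loop body applied to the three-entry dict, expressed entry-wise
theorem secStep_triple (c : List (String × String)) (a z s : String) :
    secStep [("authentication", a), ("authorization", z), ("data_sensitivity", s)] c =
    [("authentication", if List.lookup "authentication" c == some "required" then "required" else a),
     ("authorization", if List.lookup "authorization" c == some "required" then "required" else z),
     ("data_sensitivity",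
        if (List.lookup "data_sensitivity" c).getD "public" == "restricted" then "restricted"
        else if (List.lookup "data_sensitivity" c).getD "public" == "confidential" && s == "public"
             then "confidential" else s)] := by
  by_cases h1 : List.lookup "authentication" c == some "required" <;>
  by_cases h2 : List.lookup "authorization" c == some "required" <;>
  simp [secStep, pySetKey, h1, h2, List.lookup] <;> split_ifs <;> simp_all

-- == on String is symmetric (used to align List.contains's orientation)
theorem str_beq_comm (x y : String) : (x == y) = (y == x) := by
  by_cases h : x = y
  · simp [h]
  · simp [h, Ne.symm h]

-- merging one step's effect into the rest-of-list summary, per key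
theorem if_req (b1 a1 : Bool) (a : String) :
    (if a1 then "required" else if b1 then "required" else a)
      = (if (b1 || a1) then "required" else a) := by
  cases a1 <;> cases b1 <;> simp

theorem sens_merge (g s : String) (r1 c1 : Bool) :
    (if r1 then "restricted"
     else if c1 && ("public" == (if "restricted" == g then "restricted"
                                 else if "confidential" == g && s == "public" then "confidential" else s))
          then "confidential"
          else (if "restricted" == g then "restricted"
                else if "confidential" == g && s == "public" then "confidential" else s))
      = (if ("restricted" == g || r1) then "restricted"
         else if (("confidential" == g || c1) && s == "public") then "confidential" else s) := by
  cases r1 <;> cases c1 <;>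
  by_cases hr : "restricted" = g <;> by_cases hc : "confidential" = g <;> by_cases hs : s = "public" <;>
  simp_all [beq_iff_eq] <;> (try subst g) <;> (try subst s) <;> (try simp_all) <;> (try tauto)

-- invariant of A's loop over the three-entry dict, for an arbitrary current state (a, z, s)
theorem secLoop_eq (subs : List (List (String × String))) (a z s : String) :
    subs.foldl secStep [("authentication", a), ("authorization", z), ("data_sensitivity", s)] =
    [("authentication",
        if subs.any (fun c => List.lookup "authentication" c == some "required") then "required" else a),
     ("authorization",
        if subs.any (fun c => List.lookup "authorization" c == some "required") then "required" else z),
     ("data_sensitivity",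
        if (subs.map (fun c => (List.lookup "data_sensitivity" c).getD "public")).contains "restricted"
        then "restricted"
        else if (subs.map (fun c => (List.lookup "data_sensitivity" c).getD "public")).contains "confidential"
                  && s == "public"
             then "confidential" else s)] := by
  induction subs generalizing a z s with
  | nil => simp
  | cons c cs ih =>
    rw [List.foldl_cons, secStep_triple, ih]
    simp only [List.any_cons, List.map_cons, List.contains_cons, if_req, str_beq_comm]
    rw [sens_merge]
    rfl

-- ===== VERDICT (by name: the statement is the Claim_ definition above) =====
theorem determine_security_context_py_spec : Claim_equal_determine_security_context_py := by
  intro subs _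
  unfold Spec_determine_security_context_py determine_security_context_py determine_security_context_py_alt
  rw [secLoop_eq]
  simp
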